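-- pv_equiv track=rewrite | github.com/ashyphrodite/recipe-book | lib/misc.py | charToTypeAndInt
-- ===== SOURCE A (Python) =====
-- uchar_str = "abcdefghijklmnopqrstuvwxyz"
--
-- lchar_str = "ABCDEFGHIJKLMNOPQRSTUVWXYZ"
--
-- num_str = "0123456789."
--
-- def charToTypeAndInt(char):
-- 	for i in range(len(uchar_str)):
-- 		if uchar_str[i] == char:
-- 			return "uchar", i
--
-- 	for i in range(len(lchar_str)):
-- 		if lchar_str[i] == char:
-- 			return "lchar", i
--
-- 	for i in range(len(num_str)):
-- 		if num_str[i] == char: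
-- 			return "num", i
--
-- 	return "other", 100
-- ===== SOURCE B (Python) =====
-- uchar_str = "abcdefghijklmnopqrstuvwxyz"
--
-- lchar_str = "ABCDEFGHIJKLMNOPQRSTUVWXYZ"
--
-- num_str = "0123456789."
--
-- def charToTypeAndInt(char):
--     # closed form on the character code: no scanning, no table
--     if isinstance(char, str) and len(char) == 1:
--         o = ord(char)
--         if 97 <= o <= 122:
--             return "uchar", o - 97
--         if 65 <= o <= 90:
--             return "lchar", o - 65
--         if 48 <= o <= 57:
--             return "num", o - 48
--         if o == 46:
--             return "num", 10
--     return "other", 100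
-- ===== Notes on version B (the rewrite author's own statement) =====
-- stated objective: simpler
-- what changed: A scans the three alphabet strings index by index with early returns; B never touches those strings at call time: it computes the answer in closed form from the character code (ord arithmetic: o-97 / o-65 / o-48, '.' as the special num index 10), falling through to ('other',100) for non-single-character input.
import Mathlib
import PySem

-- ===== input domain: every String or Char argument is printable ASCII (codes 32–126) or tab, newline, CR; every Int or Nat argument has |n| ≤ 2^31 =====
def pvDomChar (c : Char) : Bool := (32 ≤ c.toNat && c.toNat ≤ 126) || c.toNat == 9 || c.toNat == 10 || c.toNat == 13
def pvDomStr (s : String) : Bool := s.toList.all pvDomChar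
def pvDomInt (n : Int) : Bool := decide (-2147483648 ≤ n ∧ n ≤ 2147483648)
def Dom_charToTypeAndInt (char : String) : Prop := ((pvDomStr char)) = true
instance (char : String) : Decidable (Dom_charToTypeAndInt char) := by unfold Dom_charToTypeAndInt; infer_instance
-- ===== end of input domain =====

-- B replaces A's three sequential index scans with a closed-form computation on the
-- character code (ord arithmetic), falling through to ("other", 100) (objective: simpler).

def ucharStr : String := "abcdefghijklmnopqrstuvwxyz"
def lcharStr : String := "ABCDEFGHIJKLMNOPQRSTUVWXYZ"
def numStr : String := "0123456789."

-- ===== PORT A =====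
-- 'for i in range(len(s)): if s[i] == char: return i' — index scan with early return;
-- s[i] is the one-character STRING at position i, compared to char by string equality.
def pvScan : List Char → Int → String → Option Int
  | [], _, _ => none
  | c :: rest, i, char => if String.ofList [c] = char then some i else pvScan rest (i + 1) char

def charToTypeAndInt (char : String) : String × Int :=
  match pvScan ucharStr.toList 0 char with
  | some i => ("uchar", i)
  | none =>
    match pvScan lcharStr.toList 0 char with
    | some i => ("lchar", i)
    | none =>
      match pvScan numStr.toList 0 char with
      | some i => ("num", i)
      | none => ("other", 100)

-- ===== PORT B =====
-- if len(char) == 1: o = ord(char); range checks with ord arithmetic; else ("other", 100)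
def charToTypeAndInt_alt (char : String) : String × Int :=
  match char.toList with
  | [c] =>
    let o : Int := c.toNat
    if 97 ≤ o ∧ o ≤ 122 then ("uchar", o - 97)
    else if 65 ≤ o ∧ o ≤ 90 then ("lchar", o - 65)
    else if 48 ≤ o ∧ o ≤ 57 then ("num", o - 48)
    else if o = 46 then ("num", 10)
    else ("other", 100)
  | _ => ("other", 100)

-- ===== PRECONDITION & SPEC =====
def Spec_charToTypeAndInt (char : String) (out : String × Int) : Prop := out = charToTypeAndInt_alt char
instance (char : String) (out : String × Int) : Decidable (Spec_charToTypeAndInt char out) := by unfold Spec_charToTypeAndInt; infer_instance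

-- ===== CLAIM (what is proved, stated in full; the proofs are below) =====
def Claim_equal_charToTypeAndInt : Prop := ∀ (char : String), Dom_charToTypeAndInt char → Spec_charToTypeAndInt char (charToTypeAndInt char)

-- ===== LEMMAS AND PROOFS =====

-- A's scans never match a string that is not a single character
theorem pvScan_none_of_len_ne_one (cs : List Char) (i : Int) (char : String)
    (h : char.toList.length ≠ 1) : pvScan cs i char = none := by
  induction cs generalizing i with
  | nil => rfl
  | cons c rest ih =>
    rw [pvScan]
    rw [if_neg, ih]
    intro he
    apply h
    rw [← he, String.toList_ofList]
    rfl

-- both ports agree on every single allowed character, by exhaustive evaluation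
set_option maxRecDepth 20000 in
theorem key : ∀ n, n < 127 →
    charToTypeAndInt (String.ofList [Char.ofNat n]) =
      charToTypeAndInt_alt (String.ofList [Char.ofNat n]) := by decide

theorem charToTypeAndInt_eq_alt (char : String) (hdom : Dom_charToTypeAndInt char) :
    charToTypeAndInt char = charToTypeAndInt_alt char := by
  cases hl : char.toList with
  | nil =>
    have h1 : char.toList.length ≠ 1 := by rw [hl]; simp
    rw [charToTypeAndInt, charToTypeAndInt_alt, hl,
      pvScan_none_of_len_ne_one _ _ _ h1, pvScan_none_of_len_ne_one _ _ _ h1,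
      pvScan_none_of_len_ne_one _ _ _ h1]
  | cons c rest =>
    cases rest with
    | cons d rest' =>
      have h1 : char.toList.length ≠ 1 := by rw [hl]; simp
      rw [charToTypeAndInt, charToTypeAndInt_alt, hl,
        pvScan_none_of_len_ne_one _ _ _ h1, pvScan_none_of_len_ne_one _ _ _ h1,
        pvScan_none_of_len_ne_one _ _ _ h1]
    | nil =>
      have hc : pvDomChar c = true := by
        have := (List.all_eq_true.mp hdom) c (by rw [hl]; exact List.mem_singleton.mpr rfl)
        exact this
      have hn : c.toNat < 127 := by
        simp only [pvDomChar, Bool.or_eq_true, Bool.and_eq_true, decide_eq_true_eq,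
          beq_iff_eq] at hc
        omega
      have hchar : char = String.ofList [c] := by
        rw [← String.toList_inj, hl, String.toList_ofList]
      have hofc : Char.ofNat c.toNat = c := c.ofNat_toNat
      calc charToTypeAndInt char
          = charToTypeAndInt (String.ofList [Char.ofNat c.toNat]) := by rw [hofc, ← hchar]
        _ = charToTypeAndInt_alt (String.ofList [Char.ofNat c.toNat]) := key c.toNat hn
        _ = charToTypeAndInt_alt char := by rw [hofc, ← hchar]

-- ===== VERDICT (by name: the statement is the Claim_ definition above) =====
theorem charToTypeAndInt_spec : Claim_equal_charToTypeAndInt := by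
  intro char hdom
  exact charToTypeAndInt_eq_alt char hdom
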